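-- pv_equiv track=rewrite | github.com/TEFLX/Machine-learning-practical-PTU-Btech-6th-sem | Machine_learning practicals/naïve Bayesian classifier for a sample training data .py | frequency_table
-- ===== SOURCE A (Python) =====
-- def frequency_table(dataset):
--     freq_table = {}
--     for class_value, instances in dataset.items():
--         freq_table[class_value] = {}
--         for instance in instances:
--             for i in range(len(instance)-1):
--                 value = instance[i]
--                 if i not in freq_table[class_value]:
--                     freq_table[class_value][i] = {}
--                 if value not in freq_table[class_value][i]:
--                     freq_table[class_value][i][value] = 0
--                 freq_table[class_value][i][value] += 1
--     return freq_table
-- ===== SOURCE B (Python) =====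
-- def _column_counts(instances, i):
--     counts = {}
--     for inst in instances:
--         if len(inst) > i + 1:
--             v = inst[i]
--             counts[v] = counts.get(v, 0) + 1
--     return counts
--
--
-- def frequency_table(dataset):
--     freq_table = {}
--     for class_value, instances in dataset.items():
--         width = max((len(inst) - 1 for inst in instances), default=0)
--         freq_table[class_value] = {i: _column_counts(instances, i)
--                                    for i in range(width)}
--     return freq_table
-- ===== Notes on version B (the rewrite author's own statement) =====
-- stated objective: alternative
-- what changed: B computes each class's table column-by-column (one counting pass per feature column over the instances, keyed 0..width-1) instead of A's row-wise scan that incrementally builds and mutates nested dicts per instance.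
import Mathlib
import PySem

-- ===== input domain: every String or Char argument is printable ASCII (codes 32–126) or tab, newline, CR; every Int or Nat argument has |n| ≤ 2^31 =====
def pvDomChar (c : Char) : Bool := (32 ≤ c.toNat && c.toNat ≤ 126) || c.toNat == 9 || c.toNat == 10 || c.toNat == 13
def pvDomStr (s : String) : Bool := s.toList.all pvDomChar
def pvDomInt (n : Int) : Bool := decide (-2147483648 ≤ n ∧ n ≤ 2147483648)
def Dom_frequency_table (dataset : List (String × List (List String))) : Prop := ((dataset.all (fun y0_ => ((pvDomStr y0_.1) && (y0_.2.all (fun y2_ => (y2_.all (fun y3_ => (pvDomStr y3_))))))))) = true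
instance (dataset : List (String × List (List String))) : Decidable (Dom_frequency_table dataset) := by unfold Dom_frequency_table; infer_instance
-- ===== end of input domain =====

-- B builds the same frequency table column-by-column (one counting pass per feature column)
-- instead of A's row-wise scan that incrementally builds the nested dicts; objective: alternative decomposition.

-- ===== PORT A =====
-- one row of A's inner loop: for i in range(len(instance)-1): … update freq_table[class_value][i][value]
-- (Python mutates the dict object freq_table[class_value] in place; it is modelled as the threaded accumulator)
def pvAStep (inner : PySem.Dict Int (PySem.Dict String Int)) (inst : List String) :
    PySem.Dict Int (PySem.Dict String Int) :=
  (PySem.List.pyRange 0 ((inst.length : Int) - 1)).foldl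
    (fun inner i =>
      let value := (PySem.List.pyGet? inst i).getD ""   -- always in range: 0 ≤ i < len(inst)-1
      let inner1 := if inner.contains i then inner else inner.insert i PySem.Dict.empty
      let col := inner1.getD i PySem.Dict.empty
      let col1 := if col.contains value then col else col.insert value 0
      inner1.insert i (col1.insert value (col1.getD value 0 + 1)))
    inner

-- shared output conversion: the nested Dicts flattened into the required nested item lists
def pvItems (d : PySem.Dict String (PySem.Dict Int (PySem.Dict String Int))) :
    List (String × List (Int × List (String × Int))) :=
  d.items.map (fun p => (p.1, p.2.items.map (fun q => (q.1, q.2.items))))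

def frequency_table (dataset : List (String × List (List String))) :
    List (String × List (Int × List (String × Int))) :=
  pvItems (dataset.foldl
    (fun ft p => ft.insert p.1 (p.2.foldl pvAStep PySem.Dict.empty))
    PySem.Dict.empty)

-- ===== PORT B =====
-- _column_counts(instances, i): one counting pass down column i
def pvColCounts (instances : List (List String)) (i : Int) : PySem.Dict String Int :=
  instances.foldl
    (fun counts inst =>
      if (inst.length : Int) > i + 1 then
        let v := (PySem.List.pyGet? inst i).getD ""
        counts.insert v (counts.getD v 0 + 1)
      else counts)
    PySem.Dict.empty

-- {i: _column_counts(instances, i) for i in range(width)} with width = max((len(inst)-1 …), default=0)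
def pvClassTable (instances : List (List String)) : PySem.Dict Int (PySem.Dict String Int) :=
  let width := PySem.List.maxD (instances.map (fun inst => (inst.length : Int) - 1)) (fun x => x) 0
  (PySem.List.pyRange 0 width).foldl
    (fun d i => d.insert i (pvColCounts instances i)) PySem.Dict.empty

def frequency_table_alt (dataset : List (String × List (List String))) :
    List (String × List (Int × List (String × Int))) :=
  pvItems (dataset.foldl (fun ft p => ft.insert p.1 (pvClassTable p.2)) PySem.Dict.empty)

-- ===== PRECONDITION & SPEC =====
def Spec_frequency_table (dataset : List (String × List (List String))) (out : List (String × List (Int × List (String × Int)))) : Prop := out = frequency_table_alt dataset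
instance (dataset : List (String × List (List String))) (out : List (String × List (Int × List (String × Int)))) : Decidable (Spec_frequency_table dataset out) := by unfold Spec_frequency_table; infer_instance

-- ===== CLAIM (what is proved, stated in full; the proofs are below) =====
def Claim_equal_frequency_table : Prop := ∀ (dataset : List (String × List (List String))), Dom_frequency_table dataset → Spec_frequency_table dataset (frequency_table dataset)

-- ===== LEMMAS AND PROOFS =====

-- the count update both programs perform on a column dict
def pvUpd (col : PySem.Dict String Int) (v : String) : PySem.Dict String Int :=
  col.insert v (col.getD v 0 + 1)

def pvVal (inst : List String) (i : Int) : String := (PySem.List.pyGet? inst i).getD ""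

-- A's row step collapses to one insert per index
lemma pvAStep_eq (inner : PySem.Dict Int (PySem.Dict String Int)) (inst : List String) :
    pvAStep inner inst =
      (PySem.List.pyRange 0 ((inst.length : Int) - 1)).foldl
        (fun inner i => inner.insert i (pvUpd (inner.getD i PySem.Dict.empty) (pvVal inst i)))
        inner := by
  unfold pvAStep
  apply PySem.List.foldl_congr_mem
  intro d i _
  simp only [pvUpd, pvVal]
  by_cases hc : d.contains i = true
  · simp only [hc, if_true]
    by_cases hv : (d.getD i PySem.Dict.empty).contains ((PySem.List.pyGet? inst i).getD "") = true
    · simp only [hv, if_true]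
    · simp only [Bool.not_eq_true] at hv
      simp only [hv, Bool.false_eq_true, if_false]
      rw [PySem.Dict.insert_insert_self, PySem.Dict.getD_insert_self,
        PySem.Dict.getD_of_not_contains _ _ hv]
  · simp only [Bool.not_eq_true] at hc
    simp only [hc, Bool.false_eq_true, if_false]
    rw [PySem.Dict.getD_insert_self, PySem.Dict.insert_insert_self,
      PySem.Dict.getD_of_not_contains _ _ hc]
    have hce : (PySem.Dict.empty : PySem.Dict String Int).contains
        ((PySem.List.pyGet? inst i).getD "") = false := by
      simp [PySem.Dict.contains_empty]
    simp only [hce, Bool.false_eq_true, if_false]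
    rw [PySem.Dict.insert_insert_self, PySem.Dict.getD_insert_self, PySem.Dict.getD_empty]

-- generic: a fold of inserts whose written value depends only on the old value at that key
lemma getD_foldl_insert_step {κ ν : Type} [BEq κ] [LawfulBEq κ] [DecidableEq κ]
    (l : List κ) (hl : l.Nodup) (g : ν → κ → ν) (dflt : ν) (d : PySem.Dict κ ν) (i : κ) :
    ((l.foldl (fun d k => d.insert k (g (d.getD k dflt) k)) d).getD i dflt) =
      if i ∈ l then g (d.getD i dflt) i else d.getD i dflt := by
  induction l generalizing d with
  | nil => simp
  | cons k t ih =>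
    simp only [List.foldl_cons]
    rw [ih (List.Nodup.of_cons hl)]
    by_cases hik : i = k
    · subst hik
      have : i ∉ t := (List.nodup_cons.mp hl).1
      simp [this, PySem.Dict.getD_insert_self]
    · rw [PySem.Dict.getD_insert_of_ne _ _ _ hik]
      simp [hik]

lemma pyRange_zero_nonpos {a : Int} (h : a ≤ 0) : PySem.List.pyRange 0 a = [] := by
  rw [PySem.List.pyRange_of_pos 0 a (by norm_num)]
  simp; omega

lemma nodup_pyRange (a b : Int) : (PySem.List.pyRange a b).Nodup := by
  rw [PySem.List.pyRange_of_pos a b (by norm_num)]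
  exact List.Nodup.map (fun x y h => by simpa using h) List.nodup_range

-- Set.update adds nothing when everything is already present
lemma set_update_of_subset {s : PySem.Set Int} {l : List Int} (h : ∀ x ∈ l, x ∈ s) :
    PySem.Set.update s l = s := by
  induction l generalizing s with
  | nil => rfl
  | cons x t ih =>
    have hx : x ∈ s := h x (by simp)
    show PySem.Set.update (PySem.Set.add s x) t = s
    have : PySem.Set.add s x = s := by simp [PySem.Set.add, PySem.Set.contains, hx]
    rw [this]
    exact ih (fun y hy => h y (by simp [hy]))

-- Set.update appends fresh distinct elements in order
lemma set_update_of_fresh {s : PySem.Set Int} {l : List Int} (hl : l.Nodup)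
    (h : ∀ x ∈ l, x ∉ s) : PySem.Set.update s l = s ++ l := by
  induction l generalizing s with
  | nil => simp
  | cons x t ih =>
    have hx : x ∉ s := h x (by simp)
    show PySem.Set.update (PySem.Set.add s x) t = s ++ x :: t
    have hadd : PySem.Set.add s x = s ++ [x] := by simp [PySem.Set.add, PySem.Set.contains, hx]
    rw [hadd, ih (List.Nodup.of_cons hl)]
    · simp
    · intro y hy
      simp only [List.mem_append, List.mem_singleton]
      rintro (hs | rfl)
      · exact h y (by simp [hy]) hs
      · exact (List.nodup_cons.mp hl).1 hy

lemma set_update_ranges (a b : Int) (ha : 0 ≤ a) :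
    PySem.Set.update (PySem.List.pyRange 0 a) (PySem.List.pyRange 0 b) =
      PySem.List.pyRange 0 (max a b) := by
  by_cases hba : b ≤ a
  · rw [set_update_of_subset (fun x hx => by
      rw [PySem.List.mem_pyRange_one] at hx ⊢; omega)]
    rw [max_eq_left hba]
  · rw [not_le] at hba
    rw [PySem.List.pyRange_one_append 0 a b ha (le_of_lt hba)]
    rw [show ∀ (s : PySem.Set Int) (l1 l2 : List Int),
        PySem.Set.update s (l1 ++ l2) = PySem.Set.update (PySem.Set.update s l1) l2
      from fun s l1 l2 => List.foldl_append]
    rw [set_update_of_subset (fun x hx => hx)]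
    rw [set_update_of_fresh (nodup_pyRange a b) (fun x hx hx' => by
      rw [PySem.List.mem_pyRange_one] at hx hx'; omega)]
    rw [← PySem.List.pyRange_one_append 0 a b ha (le_of_lt hba), max_eq_right (le_of_lt hba)]

lemma pyRange_zero_max0 (m : Int) :
    PySem.List.pyRange 0 (max 0 m) = PySem.List.pyRange 0 m := by
  rcases le_or_gt m 0 with h | h
  · rw [max_eq_left h, pyRange_zero_nonpos le_rfl, pyRange_zero_nonpos h]
  · rw [max_eq_right (le_of_lt h)]

lemma keys_afold_aux (instances : List (List String)) :
    ∀ (m : Int), 0 ≤ m → ∀ (d : PySem.Dict Int (PySem.Dict String Int)),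
    d.keys = PySem.List.pyRange 0 m →
    (instances.foldl pvAStep d).keys =
      PySem.List.pyRange 0 (instances.foldl (fun m inst => max m ((inst.length : Int) - 1)) m) := by
  induction instances with
  | nil => intro m _ d hd; simpa using hd
  | cons inst t ih =>
    intro m hm d hd
    simp only [List.foldl_cons]
    apply ih (max m ((inst.length : Int) - 1)) (le_trans hm (le_max_left _ _))
    rw [pvAStep_eq, PySem.Dict.keys_foldl_insert, hd, set_update_ranges m _ hm]

-- keys of A's per-class fold: the consecutive indexes up to the running maximum row width
lemma keys_afold (instances : List (List String)) :
    (instances.foldl pvAStep PySem.Dict.empty).keys =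
      PySem.List.pyRange 0
        (instances.foldl (fun m inst => max m ((inst.length : Int) - 1)) 0) := by
  apply keys_afold_aux instances 0 le_rfl
  rw [PySem.Dict.keys_empty, pyRange_zero_nonpos le_rfl]

lemma getD_afold_aux (instances : List (List String)) (i : Int) (hi : 0 ≤ i) :
    ∀ (d : PySem.Dict Int (PySem.Dict String Int)),
    (instances.foldl pvAStep d).getD i PySem.Dict.empty =
      instances.foldl
        (fun col inst => if (inst.length : Int) > i + 1 then pvUpd col (pvVal inst i) else col)
        (d.getD i PySem.Dict.empty) := by
  induction instances with
  | nil => intro d; rfl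
  | cons inst t ih =>
    intro d
    simp only [List.foldl_cons]
    rw [ih]
    congr 1
    rw [pvAStep_eq,
      getD_foldl_insert_step (g := fun col k => pvUpd col (pvVal inst k)) _ (nodup_pyRange _ _)]
    by_cases hcond : (inst.length : Int) > i + 1
    · rw [if_pos (PySem.List.mem_pyRange_one.mpr ⟨hi, by omega⟩), if_pos hcond]
    · rw [if_neg (fun hmem => hcond (by
        have := PySem.List.mem_pyRange_one.mp hmem; omega)), if_neg hcond]

-- what A accumulates at index i is exactly B's column count
lemma getD_afold (instances : List (List String)) (i : Int) (hi : 0 ≤ i) :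
    (instances.foldl pvAStep PySem.Dict.empty).getD i PySem.Dict.empty =
      pvColCounts instances i := by
  rw [getD_afold_aux instances i hi, pvColCounts, PySem.Dict.getD_empty]
  rfl

lemma foldl_max_init (t : List Int) : ∀ (a b : Int),
    t.foldl max (max a b) = max a (t.foldl max b) := by
  induction t with
  | nil => intro a b; rfl
  | cons c t ih => intro a b; simp only [List.foldl_cons, max_assoc, ih]

lemma keys_classTable (instances : List (List String)) :
    (pvClassTable instances).keys =
      PySem.List.pyRange 0
        (instances.foldl (fun m inst => max m ((inst.length : Int) - 1)) 0) := by
  unfold pvClassTable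
  rw [PySem.Dict.keys_foldl_insert (f := fun d i => pvColCounts instances i),
    PySem.Dict.keys_empty,
    set_update_of_fresh (nodup_pyRange _ _) (by simp), List.nil_append]
  rw [show instances.foldl (fun m inst => max m ((inst.length : Int) - 1)) 0 =
      (instances.map (fun inst => (inst.length : Int) - 1)).foldl max 0 from
    List.foldl_map.symm]
  cases hmap : instances.map (fun inst => (inst.length : Int) - 1) with
  | nil => rfl
  | cons x t =>
    simp only [PySem.List.maxD, PySem.List.max?_id_cons, List.foldl_cons]
    rw [foldl_max_init t 0 x, Option.getD_some, pyRange_zero_max0]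

lemma getD_classTable (instances : List (List String)) (i : Int)
    (hmem : i ∈ (pvClassTable instances).keys) :
    (pvClassTable instances).getD i PySem.Dict.empty = pvColCounts instances i := by
  unfold pvClassTable at hmem ⊢
  rw [getD_foldl_insert_step (g := fun _ k => pvColCounts instances k) _ (nodup_pyRange _ _)]
  rw [PySem.Dict.keys_foldl_insert (f := fun d i => pvColCounts instances i),
    PySem.Dict.keys_empty,
    set_update_of_fresh (nodup_pyRange _ _) (by simp), List.nil_append] at hmem
  rw [if_pos hmem]

-- the per-class dicts agree
lemma afold_eq_classTable (instances : List (List String)) :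
    instances.foldl pvAStep PySem.Dict.empty = pvClassTable instances := by
  apply PySem.Dict.ext
  rw [PySem.Dict.items_eq_map_keys _ (by rw [keys_afold]; exact nodup_pyRange _ _) PySem.Dict.empty,
    PySem.Dict.items_eq_map_keys _ (by rw [keys_classTable]; exact nodup_pyRange _ _) PySem.Dict.empty,
    keys_afold, keys_classTable]
  apply List.map_congr_left
  intro k hk
  have hk0 : 0 ≤ k := (PySem.List.mem_pyRange_one.mp hk).1
  rw [getD_afold _ _ hk0, getD_classTable]
  rw [keys_classTable]
  exact hk

-- ===== VERDICT (by name: the statement is the Claim_ definition above) =====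
theorem frequency_table_spec : Claim_equal_frequency_table := by
  intro dataset _
  unfold Spec_frequency_table frequency_table frequency_table_alt
  simp only [afold_eq_classTable]
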